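-- pv_equiv track=rewrite | github.com/adanos-software/free-ticker-database | scripts/alias_policy.py | duplicate_alias_counts
-- ===== SOURCE A (Python) =====
-- from collections import Counter
--
-- def duplicate_alias_counts(alias_rows: list[dict[str, str]]) -> Counter[str]:
--     alias_to_tickers: dict[str, set[str]] = {}
--     for row in alias_rows:
--         alias = row.get("alias", "")
--         ticker = row.get("ticker", "")
--         if not alias or not ticker:
--             continue
--         alias_to_tickers.setdefault(alias, set()).add(ticker)
--     return Counter({alias: len(tickers) for alias, tickers in alias_to_tickers.items() if len(tickers) > 1})
-- ===== SOURCE B (Python) =====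
-- from collections import Counter
--
--
-- def duplicate_alias_counts(alias_rows: list[dict[str, str]]) -> Counter[str]:
--     # Nested-scan approach: no grouping structure is maintained at all.
--     # Materialise the valid (alias, ticker) pairs, list the aliases in
--     # first-seen order, then for each alias rescan the pairs to count its
--     # distinct tickers with one set comprehension.
--     valid = [(a, t) for row in alias_rows
--              if (a := row.get("alias", "")) and (t := row.get("ticker", ""))]
--     seen: list[str] = []
--     for a, _ in valid:
--         if a not in seen:
--             seen.append(a)
--     return Counter({a: n for a in seen
--                     if (n := len({t for b, t in valid if b == a})) > 1})
-- ===== Notes on version B (the rewrite author's own statement) =====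
-- stated objective: alternative
-- what changed: Replaces A's single-pass incremental dict-of-sets grouping with a nested-scan strategy that keeps no grouping structure: it materialises the valid pairs, lists aliases in first-seen order, and rescans the pair list per alias to count its distinct tickers with a set comprehension.
import Mathlib
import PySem

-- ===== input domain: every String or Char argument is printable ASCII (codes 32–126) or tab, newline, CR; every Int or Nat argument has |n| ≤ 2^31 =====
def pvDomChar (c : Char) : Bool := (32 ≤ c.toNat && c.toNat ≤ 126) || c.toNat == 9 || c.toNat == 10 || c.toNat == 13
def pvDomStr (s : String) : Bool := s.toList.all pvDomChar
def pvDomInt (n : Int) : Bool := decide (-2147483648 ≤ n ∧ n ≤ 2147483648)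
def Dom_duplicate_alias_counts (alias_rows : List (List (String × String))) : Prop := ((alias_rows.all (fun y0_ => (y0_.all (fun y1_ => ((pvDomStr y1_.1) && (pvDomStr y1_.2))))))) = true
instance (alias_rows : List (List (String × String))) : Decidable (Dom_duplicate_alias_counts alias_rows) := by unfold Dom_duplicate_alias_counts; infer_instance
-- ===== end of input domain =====

-- B drops A's incremental dict-of-sets: it materialises the valid pairs once and rescans them
-- per first-seen alias to count distinct tickers; objective: alternative (nested scans, no grouping map).


-- ===== PORT A =====
-- row.get("alias", "") / row.get("ticker", "")
def pvGetAlias (row : List (String × String)) : String := PySem.Dict.getD (PySem.Dict.mk row) "alias" ""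
def pvGetTicker (row : List (String × String)) : String := PySem.Dict.getD (PySem.Dict.mk row) "ticker" ""

def duplicate_alias_counts (alias_rows : List (List (String × String))) : List (String × Int) :=
  let alias_to_tickers : PySem.Dict String (PySem.Set String) :=
    alias_rows.foldl (fun d row =>
      let a_ := pvGetAlias row
      let t_ := pvGetTicker row
      if a_ = "" ∨ t_ = "" then d
      else d.insert a_ (PySem.Set.add (d.getD a_ PySem.Set.empty) t_))
      PySem.Dict.empty
  -- Counter({alias: len(tickers) ... if len(tickers) > 1}) : comprehension over items
  (alias_to_tickers.items.filter (fun kv => decide (1 < kv.2.length))).map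
    (fun kv => (kv.1, (kv.2.length : Int)))

-- ===== PORT B =====
def duplicate_alias_counts_alt (alias_rows : List (List (String × String))) : List (String × Int) :=
  -- valid = [(a, t) for row in alias_rows if (a := ...) and (t := ...)]
  let valid : List (String × String) :=
    alias_rows.filterMap (fun row =>
      let a := pvGetAlias row
      let t := pvGetTicker row
      if a ≠ "" ∧ t ≠ "" then some (a, t) else none)
  -- seen: aliases in first-seen order (explicit membership-test loop)
  let seen : List String :=
    valid.foldl (fun s p => if p.1 ∈ s then s else s ++ [p.1]) []
  -- Counter({a: n for a in seen if (n := len({t for b, t in valid if b == a})) > 1})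
  seen.filterMap (fun a =>
    let n := (PySem.Set.ofList ((valid.filter (fun p => p.1 == a)).map Prod.snd)).length
    if 1 < n then some (a, (n : Int)) else none)

-- ===== PRECONDITION & SPEC =====
def Spec_duplicate_alias_counts (alias_rows : List (List (String × String))) (out : List (String × Int)) : Prop := out = duplicate_alias_counts_alt alias_rows
instance (alias_rows : List (List (String × String))) (out : List (String × Int)) : Decidable (Spec_duplicate_alias_counts alias_rows out) := by unfold Spec_duplicate_alias_counts; infer_instance

-- ===== CLAIM (what is proved, stated in full; the proofs are below) =====
def Claim_equal_duplicate_alias_counts : Prop := ∀ (alias_rows : List (List (String × String))), Dom_duplicate_alias_counts alias_rows → Spec_duplicate_alias_counts alias_rows (duplicate_alias_counts alias_rows)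

-- ===== LEMMAS AND PROOFS =====

-- the grouping step of A, over an explicit pair list
def pvStep (d : PySem.Dict String (PySem.Set String)) (p : String × String) : PySem.Dict String (PySem.Set String) :=
  d.insert p.1 (PySem.Set.add (d.getD p.1 PySem.Set.empty) p.2)

-- the valid pairs, in row order
def pvPairs (alias_rows : List (List (String × String))) : List (String × String) :=
  alias_rows.filterMap (fun row =>
    let a := pvGetAlias row
    let t := pvGetTicker row
    if a ≠ "" ∧ t ≠ "" then some (a, t) else none)

-- A's row loop processes exactly the valid pairs
lemma foldA_eq_pairs (alias_rows : List (List (String × String)))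
    (d : PySem.Dict String (PySem.Set String)) :
    alias_rows.foldl (fun d row =>
      let a_ := pvGetAlias row
      let t_ := pvGetTicker row
      if a_ = "" ∨ t_ = "" then d
      else d.insert a_ (PySem.Set.add (d.getD a_ PySem.Set.empty) t_)) d
    = (pvPairs alias_rows).foldl pvStep d := by
  induction alias_rows generalizing d with
  | nil => rfl
  | cons row rows ih =>
    simp only [List.foldl_cons, pvPairs, List.filterMap_cons]
    by_cases h : pvGetAlias row = "" ∨ pvGetTicker row = ""
    · have hb : ¬ (pvGetAlias row ≠ "" ∧ pvGetTicker row ≠ "") := by tauto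
      simp only [hb, if_false, h, if_true]
      simpa [pvPairs] using ih d
    · push Not at h
      have hif : ¬ (pvGetAlias row = "" ∨ pvGetTicker row = "") := by tauto
      rw [if_neg hif, if_pos h]
      simpa [pvPairs, pvStep] using
        ih (pvStep d (pvGetAlias row, pvGetTicker row))

-- value of A's dict at any alias, after grouping a pair list
lemma grp_getD (P : List (String × String)) (d : PySem.Dict String (PySem.Set String)) (a : String) :
    (P.foldl pvStep d).getD a PySem.Set.empty
      = PySem.Set.update (d.getD a PySem.Set.empty) ((P.filter (fun p => p.1 == a)).map Prod.snd) := by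
  induction P generalizing d with
  | nil => simp [PySem.Set.update_nil]
  | cons p P ih =>
    simp only [List.foldl_cons, List.filter_cons, ih, pvStep]
    by_cases h : p.1 = a
    · subst h
      simp [PySem.Dict.getD_insert_self, PySem.Set.update_cons]
    · have hb : (p.1 == a) = false := by simp [h]
      have hne : ¬ (a = p.1) := fun e => h e.symm
      simp [hb, PySem.Dict.getD_insert, hne]

-- characterisation of A's grouped dict as items over the deduped alias list
lemma itemsA (P : List (String × String)) :
    (P.foldl pvStep PySem.Dict.empty).items
      = (PySem.Set.ofList (P.map Prod.fst)).map
          (fun a => (a, PySem.Set.ofList ((P.filter (fun p => p.1 == a)).map Prod.snd))) := by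
  have hkeys : (P.foldl pvStep PySem.Dict.empty).keys = PySem.Set.ofList (P.map Prod.fst) := by
    have := PySem.Dict.keys_foldl_insert_key (l := P) (key := Prod.fst)
      (f := fun d p => PySem.Set.add (d.getD p.1 PySem.Set.empty) p.2) (d := PySem.Dict.empty)
    simpa [pvStep, PySem.Dict.keys_empty, PySem.Set.update_empty] using this
  have hnd : (P.foldl pvStep PySem.Dict.empty).keys.Nodup := by
    exact PySem.Dict.nodup_keys_foldl_insert_key P Prod.fst
      (fun d p => PySem.Set.add (d.getD p.1 PySem.Set.empty) p.2) PySem.Dict.empty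
      (by simp)
  rw [PySem.Dict.items_eq_map_keys _ hnd PySem.Set.empty, hkeys]
  refine List.map_congr_left (fun a _ => ?_)
  rw [grp_getD]
  simp [PySem.Dict.getD_empty, PySem.Set.update_nil_left]

-- B's seen-loop computes the first-occurrence alias list
lemma seen_eq_ofList (P : List (String × String)) (s : List String) :
    P.foldl (fun s p => if p.1 ∈ s then s else s ++ [p.1]) s
      = PySem.Set.update s (P.map Prod.fst) := by
  induction P generalizing s with
  | nil => simp [PySem.Set.update_nil]
  | cons p P ih =>
    simp only [List.foldl_cons, List.map_cons, PySem.Set.update_cons, ih]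
    congr 1
    by_cases h : p.1 ∈ s <;> simp [PySem.Set.add, PySem.Set.contains, h]

-- ===== VERDICT (by name: the statement is the Claim_ definition above) =====
theorem duplicate_alias_counts_spec : Claim_equal_duplicate_alias_counts := by
  intro alias_rows _
  unfold Spec_duplicate_alias_counts duplicate_alias_counts duplicate_alias_counts_alt
  dsimp only
  rw [show (alias_rows.filterMap (fun row =>
      let a := pvGetAlias row
      let t := pvGetTicker row
      if a ≠ "" ∧ t ≠ "" then some (a, t) else none)) = pvPairs alias_rows from rfl]
  rw [foldA_eq_pairs, itemsA, seen_eq_ofList]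
  rw [show PySem.Set.update [] ((pvPairs alias_rows).map Prod.fst)
      = PySem.Set.ofList ((pvPairs alias_rows).map Prod.fst) from rfl]
  generalize PySem.Set.ofList ((pvPairs alias_rows).map Prod.fst) = K
  induction K with
  | nil => rfl
  | cons a K ih =>
    simp only [List.map_cons, List.filter_cons, List.filterMap_cons]
    by_cases h : 1 < (PySem.Set.ofList (((pvPairs alias_rows).filter (fun p => p.1 == a)).map Prod.snd)).length
    · simp [h, ih]
    · simp [h, ih]
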